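-- pv_equiv track=rewrite | github.com/pypi-data/pypi-mirror-215 | packages/metaindex/metaindex-2.3.0-py3-none-any.whl/metaindex/server.py | next_prefix
-- ===== SOURCE A (Python) =====
-- import string
--
-- def next_prefix(known):
--     indices = [0]
--     letters = string.ascii_uppercase
--     while True:
--         prefix = 'X' + ''.join([letters[p] for p in indices])
--         if prefix not in known:
--             return prefix
--
--         overflow = True
--         for pos in range(len(indices)-1, -1, -1):
--             if indices[pos] + 1 < len(letters):
--                 indices[pos] += 1
--                 for other in range(pos+1, len(indices)):
--                     indices[other] = 0
--                 overflow = False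
--                 break
--
--         if overflow:
--             indices = [0]*(len(indices) + 1)
-- ===== SOURCE B (Python) =====
-- import string
--
--
-- def next_prefix(known):
--     # Breadth-first product enumeration: build all length-L letter combos per
--     # level (shortlex order) and return the first 'X'+combo not in known.
--     letters = string.ascii_uppercase
--     combos = ['']
--     while True:
--         combos = [c + ch for c in combos for ch in letters]
--         for c in combos:
--             prefix = 'X' + c
--             if prefix not in known:
--                 return prefix
-- ===== Notes on version B (the rewrite author's own statement) =====
-- stated objective: idiomatic
-- what changed: Replaces the mutable base-26 counter with its carry/zero-fill scan by a per-length cartesian-product enumeration (built level by level with a comprehension) scanned in the same shortlex order.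
import Mathlib
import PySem

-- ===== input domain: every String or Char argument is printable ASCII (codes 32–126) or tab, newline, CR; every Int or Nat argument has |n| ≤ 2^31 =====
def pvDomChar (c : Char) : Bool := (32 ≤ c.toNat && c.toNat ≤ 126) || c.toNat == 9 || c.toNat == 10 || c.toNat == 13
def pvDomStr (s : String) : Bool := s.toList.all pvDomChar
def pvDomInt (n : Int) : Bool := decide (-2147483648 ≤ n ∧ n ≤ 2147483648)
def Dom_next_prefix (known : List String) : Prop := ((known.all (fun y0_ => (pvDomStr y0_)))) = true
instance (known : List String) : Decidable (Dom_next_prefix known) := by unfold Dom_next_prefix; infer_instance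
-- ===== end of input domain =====

-- B replaces A's mutable base-26 counter (carry scan + zero-fill + overflow growth) by a
-- per-length cartesian-product enumeration built level by level; same shortlex scan, same result.

-- ===== PORT A =====
-- string.ascii_uppercase
def pvLetters : List Char :=
  ['A','B','C','D','E','F','G','H','I','J','K','L','M',
   'N','O','P','Q','R','S','T','U','V','W','X','Y','Z']

-- letters[p]; A only ever indexes with counter digits 0 ≤ p < 26, so the default is unreachable
def pvChr (p : Nat) : Char := pvLetters.getD p 'A'

-- prefix = 'X' + ''.join([letters[p] for p in indices])
def pvWordA (indices : List Nat) : String := String.ofList ('X' :: indices.map pvChr)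

-- the backward scan `for pos in range(len(indices)-1, -1, -1)` with its zero-fill and break,
-- written as recursion from the most-significant digit: the lower (more-right) positions are
-- tried first; `none` = every position overflowed (Python's `overflow = True`)
def pvIncA : List Nat → Option (List Nat)
  | [] => none
  | d :: rest =>
    match pvIncA rest with
    | some r => some (d :: r)
    | none => if d + 1 < 26 then some ((d + 1) :: List.replicate rest.length 0) else none

-- one iteration's update of `indices` (the overflow branch grows the counter by one digit)
def pvStepA (indices : List Nat) : List Nat :=
  match pvIncA indices with
  | some r => r
  | none => List.replicate (indices.length + 1) 0

-- the `while True` loop; fuel |known|+1 is enough because the scanned candidates are pairwise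
-- distinct, so among the first |known|+1 of them one is missing from `known` (proved below)
def pvLoopA (known : List String) : Nat → List Nat → String
  | 0, _ => ""
  | fuel + 1, indices =>
    let pfx := pvWordA indices
    if known.contains pfx then pvLoopA known fuel (pvStepA indices) else pfx

def next_prefix (known : List String) : String := pvLoopA known (known.length + 1) [0]

-- ===== PORT B =====
-- combos = [c + ch for c in combos for ch in letters]
def pvExtendB (combos : List (List Char)) : List (List Char) :=
  combos.flatMap (fun c => pvLetters.map (fun ch => c ++ [ch]))

-- Source B's `while True` loop: extend the level, scan it; same sufficient fuel as for A
def pvLoopB (known : List String) : Nat → List (List Char) → String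
  | 0, _ => ""
  | fuel + 1, combos =>
    let combos' := pvExtendB combos
    match combos'.find? (fun c => !known.contains (String.ofList ('X' :: c))) with
    | some c => String.ofList ('X' :: c)
    | none => pvLoopB known fuel combos'

def next_prefix_alt (known : List String) : String := pvLoopB known (known.length + 1) [[]]

-- ===== PRECONDITION & SPEC =====
def Spec_next_prefix (known : List String) (out : String) : Prop := out = next_prefix_alt known
instance (known : List String) (out : String) : Decidable (Spec_next_prefix known out) := by unfold Spec_next_prefix; infer_instance

-- ===== CLAIM (what is proved, stated in full; the proofs are below) =====
def Claim_equal_next_prefix : Prop := ∀ (known : List String), Dom_next_prefix known → Spec_next_prefix known (next_prefix known)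

-- ===== LEMMAS AND PROOFS =====

-- all base-26 digit lists of length ℓ, in shortlex/lex order (least significant digit last)
def pvCombos : Nat → List (List Nat)
  | 0 => [[]]
  | ℓ + 1 => (pvCombos ℓ).flatMap (fun xs => (List.range 26).map (fun d => xs ++ [d]))

-- all digit lists of lengths s, s+1, …, s+f-1, in order
def pvFlat (s f : Nat) : List (List Nat) := (List.range' s f).flatMap pvCombos

-- "b is the counter state after a"
def pvR (a b : List Nat) : Prop := pvStepA a = b

-- the first f counter states of A's loop starting at x
def pvStates : Nat → List Nat → List (List Nat)
  | 0, _ => []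
  | f + 1, x => x :: pvStates f (pvStepA x)

def pvP (known : List String) (s : String) : Bool := !known.contains s

theorem pvLoopA_eq (known : List String) :
    ∀ (f : Nat) (x : List Nat),
      pvLoopA known f x =
        match ((pvStates f x).map pvWordA).find? (pvP known) with
        | some s => s
        | none => "" := by
  intro f
  induction f with
  | zero => intro x; simp [pvLoopA, pvStates]
  | succ f ih =>
    intro x
    simp only [pvLoopA, pvStates, List.map_cons, List.find?_cons, pvP]
    cases h : known.contains (pvWordA x) with
    | true => simp [h, ih]
    | false => simp [h]

theorem pvFlat_succ (s f : Nat) : pvFlat s (f + 1) = pvCombos s ++ pvFlat (s + 1) f := by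
  simp [pvFlat, List.range'_succ]

theorem pvRange26 : List.range 26 =
    [0,1,2,3,4,5,6,7,8,9,10,11,12,13,14,15,16,17,18,19,20,21,22,23,24,25] := by decide

theorem pvLettersChr : pvLetters = (List.range 26).map pvChr := by decide

theorem pvExtend_comm (l : List (List Nat)) :
    pvExtendB (l.map (List.map pvChr)) =
      ((l.flatMap (fun xs => (List.range 26).map (fun d => xs ++ [d]))).map (List.map pvChr)) := by
  simp only [pvExtendB, List.flatMap_map, List.map_flatMap]
  refine List.flatMap_congr (fun xs _ => ?_)
  simp [pvLettersChr, List.map_map, Function.comp_def]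

theorem pvLoopB_eq (known : List String) :
    ∀ (f ℓ : Nat),
      pvLoopB known f ((pvCombos ℓ).map (List.map pvChr)) =
        match ((pvFlat (ℓ + 1) f).map pvWordA).find? (pvP known) with
        | some s => s
        | none => "" := by
  intro f
  induction f with
  | zero => intro ℓ; simp [pvLoopB, pvFlat]
  | succ f ih =>
    intro ℓ
    have hc : pvExtendB ((pvCombos ℓ).map (List.map pvChr))
        = (pvCombos (ℓ + 1)).map (List.map pvChr) := by
      rw [pvExtend_comm]; rfl
    have hpred : ((fun c => !known.contains (String.ofList ('X' :: c))) ∘ (List.map pvChr))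
        = pvP known ∘ pvWordA := by
      funext xs; simp [pvP, pvWordA, Function.comp]
    rw [pvFlat_succ, List.map_append, List.find?_append]
    simp only [pvLoopB, hc, List.find?_map, hpred]
    cases h : (pvCombos (ℓ + 1)).find? (pvP known ∘ pvWordA) with
    | some xs => simp [h, pvWordA]
    | none => simp [h, ih]

theorem pvStates_of_chain :
    ∀ (f : Nat) (x : List Nat) (t : List (List Nat)),
      List.IsChain pvR (x :: t) → f ≤ t.length + 1 →
      pvStates f x = (x :: t).take f := by
  intro f
  induction f with
  | zero => intros; simp [pvStates]
  | succ f ih =>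
    intro x t hc hf
    cases t with
    | nil =>
      have h0 : f = 0 := by simpa using hf
      subst h0; simp [pvStates]
    | cons y t' =>
      have hr : pvR x y := List.rel_of_isChain_cons_cons hc
      rw [pvR] at hr
      simp only [pvStates, List.take_succ_cons, hr, List.cons.injEq, true_and]
      exact ih y t' (List.isChain_of_isChain_cons hc) (by simpa using hf)

theorem pvIncA_append (xs : List Nat) (d : Nat) :
    pvIncA (xs ++ [d]) =
      if d + 1 < 26 then some (xs ++ [d + 1]) else (pvIncA xs).map (· ++ [0]) := by
  induction xs with
  | nil =>
    by_cases h : d + 1 < 26 <;> simp [pvIncA, h]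
  | cons y ys ih =>
    by_cases h : d + 1 < 26
    · simp only [List.cons_append, pvIncA, ih, h, if_true]
    · simp only [List.cons_append, pvIncA, ih, h, if_false]
      cases hy : pvIncA ys with
      | some r => simp
      | none =>
        by_cases hy1 : y + 1 < 26 <;>
          simp [hy1, List.length_append, List.replicate_succ' (n := ys.length)]

theorem pvIncA_length (xs r : List Nat) (h : pvIncA xs = some r) : r.length = xs.length := by
  induction xs generalizing r with
  | nil => simp [pvIncA] at h
  | cons y ys ih =>
    simp only [pvIncA] at h
    cases hy : pvIncA ys with
    | some r' =>
      rw [hy] at h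
      cases h
      simp [ih _ hy]
    | none =>
      rw [hy] at h
      by_cases hy1 : y + 1 < 26
      · simp only [hy1, if_true, Option.some.injEq] at h
        subst h; simp
      · simp [hy1] at h

theorem pvCombos_head (ℓ : Nat) : ∃ t, pvCombos ℓ = List.replicate ℓ 0 :: t := by
  induction ℓ with
  | zero => exact ⟨[], rfl⟩
  | succ ℓ ih =>
    obtain ⟨t, ht⟩ := ih
    refine ⟨(List.drop 1 ((List.range 26).map (fun d => List.replicate ℓ 0 ++ [d])))
      ++ t.flatMap (fun xs => (List.range 26).map (fun d => xs ++ [d])), ?_⟩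
    rw [show pvCombos (ℓ + 1)
        = (pvCombos ℓ).flatMap (fun xs => (List.range 26).map (fun d => xs ++ [d])) from rfl, ht]
    rw [List.flatMap_cons, pvRange26]
    simp [List.replicate_succ' (n := ℓ)]

theorem pvCombos_len (ℓ : Nat) : ∀ xs ∈ pvCombos ℓ, xs.length = ℓ := by
  induction ℓ with
  | zero => intro xs h; simp [pvCombos] at h; simp [h]
  | succ ℓ ih =>
    intro xs h
    simp only [pvCombos, List.mem_flatMap, List.mem_map, List.mem_range] at h
    obtain ⟨ys, hys, d, _, rfl⟩ := h
    simp [ih ys hys]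

theorem pvCombos_bounded (ℓ : Nat) : ∀ xs ∈ pvCombos ℓ, ∀ d ∈ xs, d < 26 := by
  induction ℓ with
  | zero => intro xs h; simp [pvCombos] at h; simp [h]
  | succ ℓ ih =>
    intro xs h
    simp only [pvCombos, List.mem_flatMap, List.mem_map, List.mem_range] at h
    obtain ⟨ys, hys, d, hd, rfl⟩ := h
    intro e he
    rcases List.mem_append.1 he with h1 | h1
    · exact ih ys hys e h1
    · simp at h1; omega

theorem pvBlockChain (x : List Nat) :
    List.IsChain pvR ((List.range 26).map (fun d => x ++ [d])) := by
  rw [List.isChain_map]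
  rw [show (26 : Nat) = Nat.succ 25 from rfl, List.isChain_range_succ]
  intro m hm
  show pvStepA (x ++ [m]) = x ++ [m + 1]
  rw [pvStepA, pvIncA_append]
  simp [show m + 1 < 26 by omega]

theorem pvIncSome (x y : List Nat) (h : pvStepA x = y) (hlen : y.length = x.length) :
    pvIncA x = some y := by
  cases hinc : pvIncA x with
  | some r =>
    simp only [pvStepA, hinc] at h
    exact congrArg some h
  | none =>
    rw [pvStepA, hinc] at h
    rw [← h] at hlen
    simp at hlen

theorem pvIncNone (x : List Nat) (k : Nat) (h : pvStepA x = List.replicate (k + 1) 0)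
    (hlen : x.length = k) : pvIncA x = none := by
  cases hinc : pvIncA x with
  | none => rfl
  | some r =>
    have hr := pvIncA_length x r hinc
    simp only [pvStepA, hinc] at h
    rw [h] at hr
    simp at hr
    omega

theorem pvGlueLevel (ℓ : Nat) :
    ∀ (l : List (List Nat)), (∀ xs ∈ l, xs.length = ℓ) →
      List.IsChain pvR (l ++ [List.replicate (ℓ + 1) 0]) →
      List.IsChain pvR (l.flatMap (fun xs => (List.range 26).map (fun d => xs ++ [d]))
        ++ [List.replicate (ℓ + 2) 0]) := by
  intro l
  induction l with
  | nil => intro _ _; simpa using List.IsChain.singleton _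
  | cons x l' ih =>
    intro hlen hc
    rw [List.flatMap_cons, List.append_assoc]
    refine List.isChain_append.2 ⟨pvBlockChain x,
      ih (fun xs h => hlen xs (List.mem_cons_of_mem _ h)) (List.isChain_of_isChain_cons hc), ?_⟩
    intro a ha b hb
    rw [List.getLast?_map, show (List.range 26).getLast? = some 25 from by decide] at ha
    simp only [Option.mem_def, Option.map_some, Option.some.injEq] at ha
    subst ha
    have hxlen : x.length = ℓ := hlen x List.mem_cons_self
    cases l' with
    | nil =>
      simp only [List.flatMap_nil, List.nil_append, List.head?_cons, Option.mem_def,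
        Option.some.injEq] at hb
      subst hb
      have hxz : pvR x (List.replicate (ℓ + 1) 0) := List.rel_of_isChain_cons_cons hc
      have hnone : pvIncA x = none := pvIncNone x ℓ hxz hxlen
      show pvStepA (x ++ [25]) = List.replicate (ℓ + 2) 0
      rw [pvStepA, pvIncA_append]
      simp [hnone, hxlen, List.replicate]
    | cons y l'' =>
      rw [List.flatMap_cons, List.append_assoc, List.head?_append, List.head?_map,
        show (List.range 26).head? = some 0 from by decide] at hb
      simp only [Option.map_some, Option.some_or, Option.mem_def, Option.some.injEq] at hb
      subst hb
      have hxy : pvR x y := List.rel_of_isChain_cons_cons hc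
      have hylen : y.length = ℓ := hlen y (List.mem_cons_of_mem _ List.mem_cons_self)
      have hsome : pvIncA x = some y := pvIncSome x y hxy (by omega)
      show pvStepA (x ++ [25]) = y ++ [0]
      rw [pvStepA, pvIncA_append]
      simp [hsome]

theorem pvChainLevel :
    ∀ (ℓ : Nat), List.IsChain pvR (pvCombos ℓ ++ [List.replicate (ℓ + 1) 0]) := by
  intro ℓ
  induction ℓ with
  | zero =>
    show List.IsChain pvR ([] :: [List.replicate 1 0])
    refine List.isChain_cons_cons.2 ⟨?_, List.IsChain.singleton _⟩
    show pvStepA [] = List.replicate 1 0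
    rfl
  | succ ℓ ih =>
    exact pvGlueLevel ℓ (pvCombos ℓ) (pvCombos_len ℓ) ih

theorem pvChainGlue {α : Type} {R : α → α → Prop} {A B : List α} {z : α}
    (h1 : List.IsChain R (A ++ [z])) (h2 : List.IsChain R (z :: B)) :
    List.IsChain R (A ++ (z :: B)) := by
  rcases List.isChain_append.1 h1 with ⟨hA, _, hAz⟩
  refine List.isChain_append.2 ⟨hA, h2, ?_⟩
  intro x hx y hy
  simp only [List.head?_cons, Option.mem_def, Option.some.injEq] at hy
  subst hy
  exact hAz x hx z (by simp)

theorem pvChainFlat : ∀ (f s : Nat), 1 ≤ s →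
    List.IsChain pvR (pvFlat s f ++ [List.replicate (s + f) 0]) := by
  intro f
  induction f with
  | zero => intro s _; simpa [pvFlat] using List.IsChain.singleton _
  | succ f ih =>
    intro s hs
    rw [pvFlat_succ, List.append_assoc]
    cases f with
    | zero =>
      simpa [pvFlat] using pvChainLevel s
    | succ f' =>
      obtain ⟨t, ht⟩ := pvCombos_head (s + 1)
      have hIH := ih (s + 1) (by omega)
      have harith : s + (f' + 1 + 1) = s + 1 + (f' + 1) := by omega
      rw [harith]
      simp only [pvFlat_succ, ht, List.cons_append, List.append_assoc] at hIH ⊢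
      exact pvChainGlue (pvChainLevel s) hIH

theorem pvFlatLen : ∀ (f s : Nat), f ≤ (pvFlat s f).length := by
  intro f
  induction f with
  | zero => intro s; omega
  | succ f ih =>
    intro s
    rw [pvFlat_succ, List.length_append]
    obtain ⟨t, ht⟩ := pvCombos_head s
    have h1 : 0 < (pvCombos s).length := by rw [ht]; simp
    have h2 := ih (s + 1)
    omega

theorem pvFlatMemLen (s f : Nat) : ∀ xs ∈ pvFlat s f, s ≤ xs.length := by
  intro xs h
  simp only [pvFlat, List.mem_flatMap, List.mem_range'_1] at h
  obtain ⟨ℓ, hℓ, hxs⟩ := h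
  have := pvCombos_len ℓ xs hxs
  omega

theorem pvExtNodup (ℓ : Nat) :
    ∀ (l : List (List Nat)), (∀ xs ∈ l, xs.length = ℓ) → l.Nodup →
      (l.flatMap (fun xs => (List.range 26).map (fun d => xs ++ [d]))).Nodup := by
  intro l
  induction l with
  | nil => intro _ _; simp
  | cons x l' ih =>
    intro hlen hnd
    rw [List.flatMap_cons, List.nodup_append]
    refine ⟨?_, ih (fun xs h => hlen xs (List.mem_cons_of_mem _ h)) hnd.of_cons, ?_⟩
    · refine List.Nodup.map ?_ List.nodup_range
      intro a b hab
      simpa using List.append_cancel_left hab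
    · intro a ha b hb heq
      simp only [List.mem_map, List.mem_range] at ha
      obtain ⟨d, _, rfl⟩ := ha
      simp only [List.mem_flatMap, List.mem_map, List.mem_range] at hb
      obtain ⟨y, hy, e, _, rfl⟩ := hb
      have hxl : x.length = ℓ := hlen x List.mem_cons_self
      have hyl : y.length = ℓ := hlen y (List.mem_cons_of_mem _ hy)
      have hxy : x = y := (List.append_inj heq (by omega)).1
      subst hxy
      exact (List.nodup_cons.1 hnd).1 hy

theorem pvCombos_nodup : ∀ (ℓ : Nat), (pvCombos ℓ).Nodup := by
  intro ℓ
  induction ℓ with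
  | zero => simp [pvCombos]
  | succ ℓ ih => exact pvExtNodup ℓ (pvCombos ℓ) (pvCombos_len ℓ) ih

theorem pvFlat_nodup : ∀ (f s : Nat), (pvFlat s f).Nodup := by
  intro f
  induction f with
  | zero => intro s; simp [pvFlat]
  | succ f ih =>
    intro s
    rw [pvFlat_succ, List.nodup_append]
    refine ⟨pvCombos_nodup s, ih (s + 1), ?_⟩
    intro a ha b hb heq
    have h1 := pvCombos_len s a ha
    have h2 := pvFlatMemLen (s + 1) f b hb
    subst heq
    omega

theorem pvFlat_bounded (s f : Nat) : ∀ xs ∈ pvFlat s f, ∀ d ∈ xs, d < 26 := by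
  intro xs h
  simp only [pvFlat, List.mem_flatMap] at h
  obtain ⟨ℓ, _, hxs⟩ := h
  exact pvCombos_bounded ℓ xs hxs

theorem pvChrInj : ∀ a < 26, ∀ b < 26, pvChr a = pvChr b → a = b := by decide

theorem pvMapChrInj : ∀ (xs ys : List Nat), (∀ d ∈ xs, d < 26) → (∀ d ∈ ys, d < 26) →
    xs.map pvChr = ys.map pvChr → xs = ys := by
  intro xs
  induction xs with
  | nil =>
    intro ys _ _ h
    cases ys with
    | nil => rfl
    | cons b ys => simp at h
  | cons a xs ih =>
    intro ys hx hy h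
    cases ys with
    | nil => simp at h
    | cons b ys =>
      simp only [List.map_cons, List.cons.injEq] at h
      have hab : a = b := pvChrInj a (hx a (by simp)) b (hy b (by simp)) h.1
      subst hab
      rw [ih ys (fun d hd => hx d (by simp [hd])) (fun d hd => hy d (by simp [hd])) h.2]

theorem pvWordInj (xs ys : List Nat) (hx : ∀ d ∈ xs, d < 26) (hy : ∀ d ∈ ys, d < 26)
    (h : pvWordA xs = pvWordA ys) : xs = ys := by
  have h' : ('X' :: xs.map pvChr) = ('X' :: ys.map pvChr) := by
    simpa [pvWordA] using congrArg String.toList h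
  exact pvMapChrInj xs ys hx hy (List.cons.injEq .. ▸ h').2

theorem pvFind?_take {α : Type} (p : α → Bool) (W : List α) (n : Nat) (x : α)
    (h : (W.take n).find? p = some x) : W.find? p = some x := by
  rw [← List.take_append_drop n W, List.find?_append, h]; rfl

theorem pvPigeon (known : List String) (W : List String) (hn : W.Nodup)
    (hlen : W.length = known.length + 1) (h : ∀ w ∈ W, w ∈ known) : False := by
  have hc : W.toFinset.card = W.length := List.toFinset_card_of_nodup hn
  have hsub : W.toFinset ⊆ known.toFinset := by
    intro a ha
    rw [List.mem_toFinset] at *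
    exact h a ha
  have h1 := Finset.card_le_card hsub
  have h2 := known.toFinset_card_le
  omega

-- ===== VERDICT (by name: the statement is the Claim_ definition above) =====
theorem next_prefix_spec : Claim_equal_next_prefix := by
  intro known _
  unfold Spec_next_prefix
  set K := known.length with hK
  obtain ⟨t1, ht1⟩ := pvCombos_head 1
  have hFlat1 : pvFlat 1 (K + 1) = List.replicate 1 0 :: (t1 ++ pvFlat 2 K) := by
    rw [pvFlat_succ, ht1]
    simp
  have hlenF : K + 1 ≤ (pvFlat 1 (K + 1)).length := pvFlatLen (K + 1) 1
  have hchain : List.IsChain pvR (pvFlat 1 (K + 1) ++ [List.replicate (1 + (K + 1)) 0]) :=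
    pvChainFlat (K + 1) 1 (by omega)
  have hchain' : List.IsChain pvR (List.replicate 1 0 ::
      ((t1 ++ pvFlat 2 K) ++ [List.replicate (1 + (K + 1)) 0])) := by
    rw [hFlat1] at hchain
    simpa using hchain
  have hstates' : pvStates (K + 1) (List.replicate 1 0) = (pvFlat 1 (K + 1)).take (K + 1) := by
    have hlen2 : K + 1 ≤ ((t1 ++ pvFlat 2 K) ++ [List.replicate (1 + (K + 1)) 0]).length + 1 := by
      have hfl : (pvFlat 1 (K + 1)).length = (t1 ++ pvFlat 2 K).length + 1 := by
        rw [hFlat1]; rfl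
      simp only [List.length_append, List.length_cons] at *
      omega
    have := pvStates_of_chain (K + 1) (List.replicate 1 0)
      ((t1 ++ pvFlat 2 K) ++ [List.replicate (1 + (K + 1)) 0]) hchain' hlen2
    rw [this, hFlat1]
    rw [show (List.replicate 1 0 :: ((t1 ++ pvFlat 2 K) ++ [List.replicate (1 + (K + 1)) 0]))
        = (List.replicate 1 0 :: (t1 ++ pvFlat 2 K)) ++ [List.replicate (1 + (K + 1)) 0] from by
      simp]
    rw [← hFlat1, List.take_append_of_le_length hlenF, hFlat1]
  set W := (pvFlat 1 (K + 1)).map pvWordA with hW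
  have hWfull : (K + 1) ≤ W.length := by
    rw [hW, List.length_map]
    exact hlenF
  have hWlen : (W.take (K + 1)).length = K + 1 := by
    rw [List.length_take]
    omega
  have hWnodup : W.Nodup := by
    refine List.Nodup.map_on ?_ (pvFlat_nodup (K + 1) 1)
    intro a ha b hb hab
    exact pvWordInj a b (pvFlat_bounded 1 (K + 1) a ha) (pvFlat_bounded 1 (K + 1) b hb) hab
  have hWtnodup : (W.take (K + 1)).Nodup := hWnodup.sublist (List.take_sublist _ _)
  obtain ⟨x, hx⟩ : ∃ x, (W.take (K + 1)).find? (pvP known) = some x := by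
    cases hfind : (W.take (K + 1)).find? (pvP known) with
    | some x => exact ⟨x, rfl⟩
    | none =>
      exfalso
      apply pvPigeon known (W.take (K + 1)) hWtnodup hWlen
      intro w hw
      have hww := List.find?_eq_none.1 hfind w hw
      simp only [pvP, Bool.not_eq_true', Bool.not_eq_false] at hww
      exact List.contains_iff_mem.1 hww
  have hA : next_prefix known = x := by
    show pvLoopA known (K + 1) [0] = x
    rw [pvLoopA_eq known (K + 1) [0]]
    have hst : pvStates (K + 1) [0] = (pvFlat 1 (K + 1)).take (K + 1) := by
      simpa using hstates'
    rw [hst, List.map_take, ← hW, hx]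
  have hB : next_prefix_alt known = x := by
    show pvLoopB known (K + 1) [[]] = x
    rw [show ([[]] : List (List Char)) = (pvCombos 0).map (List.map pvChr) from rfl]
    rw [pvLoopB_eq known (K + 1) 0]
    rw [← hW, pvFind?_take (pvP known) W (K + 1) x hx]
  rw [hA, hB]
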